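-- pv_equiv track=rewrite | github.com/thiagopelizoni/ProjectEuler | src/problem_305.py | count_within
-- ===== SOURCE A (Python) =====
-- def get_failure(s):
--     l = len(s)
--     failure = [0] * l
--     j = 0
--     for i in range(1, l):
--         while j > 0 and s[i] != s[j]:
--             j = failure[j - 1]
--         if s[i] == s[j]:
--             j += 1
--         failure[i] = j
--     return failure
--
-- def transition(state, char, s, failure):
--     j = state
--     while j > 0 and char != s[j]:
--         j = failure[j - 1]
--     if char == s[j]:
--         j += 1
--     return j
--
-- def count_within(kk, s):
--     if kk <= 0:
--         return 0
--     ds = str(kk)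
--     length = len(ds)
--     digits = [int(c) for c in ds]
--     memo = {}
--     ways_memo = {}
--     failure = get_failure(s)
--     l = len(s)
--
--     def ways(pos, tight, started):
--         if pos == length:
--             return 1 if started else 0
--         key = (pos, tight, started)
--         if key in ways_memo:
--             return ways_memo[key]
--         ans = 0
--         up = digits[pos] if tight else 9
--         for dd in range(up + 1):
--             new_tight = 1 if tight and dd == digits[pos] else 0
--             new_started = started or dd > 0
--             ans += ways(pos + 1, new_tight, new_started)
--         ways_memo[key] = ans
--         return ans
--
--     def dfs(pos, match, tight, started):
--         if pos == length:
--             return 0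
--         key = (pos, match, tight, started)
--         if key in memo:
--             return memo[key]
--         ans = 0
--         up = digits[pos] if tight else 9
--         for dd in range(up + 1):
--             new_tight = 1 if tight and dd == digits[pos] else 0
--             new_started = started or dd > 0
--             if not new_started:
--                 new_match = 0
--                 add = 0
--             else:
--                 char = str(dd)
--                 new_match = transition(match, char, s, failure)
--                 add = ways(pos + 1, new_tight, new_started) if new_match == l else 0
--                 if new_match == l:
--                     new_match = failure[l - 1]
--             ans += add + dfs(pos + 1, new_match, new_tight, new_started)
--         memo[key] = ans
--         return ans
--
--     return dfs(0, 0, 1, 0)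
-- ===== SOURCE B (Python) =====
-- def get_failure(s):
--     l = len(s)
--     failure = [0] * l
--     j = 0
--     for i in range(1, l):
--         while j > 0 and s[i] != s[j]:
--             j = failure[j - 1]
--         if s[i] == s[j]:
--             j += 1
--         failure[i] = j
--     return failure
--
-- def transition(state, char, s, failure):
--     j = state
--     while j > 0 and char != s[j]:
--         j = failure[j - 1]
--     if char == s[j]:
--         j += 1
--     return j
--
-- def count_within(kk, s):
--     if kk <= 0:
--         return 0
--     digits = [int(c) for c in str(kk)]
--     length = len(digits)
--     failure = get_failure(s)
--     l = len(s)
--     ans = 0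
--     vec = [0] * l          # counts of started, non-tight prefixes per automaton state
--     zeros = 0              # count of all-zero (not-started) non-tight prefixes
--     tm, tstarted = 0, False  # the unique tight prefix: its automaton state / started flag
--     for pos in range(length):
--         d = digits[pos]
--         rem = 10 ** (length - pos - 1)
--         lo = 0 if tstarted else 1
--         items = [(m, dd, vec[m]) for m in range(l) for dd in range(10)]
--         items += [(0, dd, zeros) for dd in range(1, 10)]
--         items += [(tm, dd, 1) for dd in range(lo, d)]
--         new_vec = [0] * l
--         for m, dd, c in items:
--             nm = transition(m, str(dd), s, failure)
--             if nm == l: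
--                 ans += c * rem
--                 nm = failure[l - 1]
--             new_vec[nm] += c
--         new_zeros = zeros + (1 if (not tstarted and d > 0) else 0)
--         if tstarted or d > 0:
--             nm = transition(tm, str(d), s, failure)
--             if nm == l:
--                 rv = 0
--                 for q in digits[pos + 1:]:
--                     rv = rv * 10 + q
--                 ans += rv + 1
--                 nm = failure[l - 1]
--             tm, tstarted = nm, True
--         else:
--             tm, tstarted = 0, False
--         vec, zeros = new_vec, new_zeros
--     return ans
-- ===== Notes on version B (the rewrite author's own statement) =====
-- stated objective: alternative
-- what changed: A counts via top-down memoized recursion (dfs over suffixes with a separate recursive 'ways' counter); B makes one forward left-to-right pass over the digits, carrying a per-automaton-state count vector, a leading-zeros count and the tight prefix, scattering KMP transitions and adding completed-match contributions in closed form (10^remaining, or suffix value + 1 on the tight path).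
import Mathlib
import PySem

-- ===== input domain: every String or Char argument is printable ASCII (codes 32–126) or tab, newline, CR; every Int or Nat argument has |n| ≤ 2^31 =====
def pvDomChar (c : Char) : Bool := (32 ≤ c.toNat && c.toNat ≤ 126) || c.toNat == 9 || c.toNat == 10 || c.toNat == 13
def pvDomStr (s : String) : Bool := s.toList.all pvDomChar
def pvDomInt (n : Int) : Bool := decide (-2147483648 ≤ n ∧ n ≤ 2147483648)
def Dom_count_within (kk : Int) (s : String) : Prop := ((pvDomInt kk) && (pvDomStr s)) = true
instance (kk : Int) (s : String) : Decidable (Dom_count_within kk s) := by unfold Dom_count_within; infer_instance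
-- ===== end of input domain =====

-- B replaces A's top-down memoized dfs/ways recursion by a single forward left-to-right pass over the digits
-- that carries counts of automaton states (objective: alternative decomposition, same asymptotic cost).
-- Both programs raise IndexError on an empty pattern string when kk > 0; Pre_ excludes exactly that.

-- ===== PORT A =====
-- shared helpers: get_failure / transition appear verbatim in both Pythons, so both ports use these.
-- The Python 'while j > 0 and char != s[j]' loop strictly decreases j (failure[j-1] < j), so fuel = initial j
-- is exact; 'List.getD … " "' is exact for the in-range indices the loop actually reaches (j < len(s)).
def pvFall (s : List Char) (fail : List Nat) (c : Char) : Nat → Nat → Nat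
  | 0, j => j
  | fuel+1, j => if 0 < j ∧ c ≠ s.getD j ' ' then pvFall s fail c fuel (fail.getD (j-1) 0) else j

def pvTrans (s : List Char) (fail : List Nat) (st : Nat) (c : Char) : Nat :=
  let j := pvFall s fail c st st
  if c = s.getD j ' ' then j + 1 else j

def pvGetFailure (s : List Char) : List Nat :=
  let l := s.length
  ((List.range' 1 (l-1)).foldl (fun (st : List Nat × Nat) i =>
    let j1 := pvFall s st.1 (s.getD i ' ') st.2 st.2
    let j2 := if s.getD i ' ' = s.getD j1 ' ' then j1 + 1 else j1
    (st.1.set i j2, j2)) (List.replicate l 0, 0)).1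

def pvDigitChar (dd : Nat) : Char := Char.ofNat (48 + dd)

-- A's 'ways' with its memo dict threaded through (the Python memoises in a closure dict)
def pvWaysM : List Nat → Bool → Bool → PySem.Dict (Nat × Bool × Bool) Int →
    Int × PySem.Dict (Nat × Bool × Bool) Int
  | [], _, started, mw => ((if started then 1 else 0), mw)
  | d :: rs, tight, started, mw =>
    match mw.get? (rs.length + 1, tight, started) with
    | some v => (v, mw)
    | none =>
      let st := (List.range ((if tight then d else 9) + 1)).foldl
        (fun (p : Int × PySem.Dict (Nat × Bool × Bool) Int) dd =>
          let r := pvWaysM rs (tight && decide (dd = d)) (started || decide (0 < dd)) p.2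
          (p.1 + r.1, r.2)) (0, mw)
      (st.1, st.2.insert (rs.length + 1, tight, started) st.1)

-- A's 'dfs' with both memo dicts threaded through (keys use the suffix length, Python's length-pos)
def pvDfsM (s : List Char) (fail : List Nat) (l : Nat) :
    List Nat → Nat → Bool → Bool →
    PySem.Dict (Nat × Nat × Bool × Bool) Int → PySem.Dict (Nat × Bool × Bool) Int →
    Int × PySem.Dict (Nat × Nat × Bool × Bool) Int × PySem.Dict (Nat × Bool × Bool) Int
  | [], _, _, _, md, mw => (0, md, mw)
  | d :: rs, m, tight, started, md, mw =>
    match md.get? (rs.length + 1, m, tight, started) with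
    | some v => (v, md, mw)
    | none =>
      let st := (List.range ((if tight then d else 9) + 1)).foldl
        (fun (p : Int × PySem.Dict (Nat × Nat × Bool × Bool) Int × PySem.Dict (Nat × Bool × Bool) Int) dd =>
          let nt := tight && decide (dd = d)
          let ns := started || decide (0 < dd)
          if ns then
            let nm := pvTrans s fail m (pvDigitChar dd)
            if nm = l then
              let w := pvWaysM rs nt ns p.2.2
              let r := pvDfsM s fail l rs (fail.getD (l-1) 0) nt ns p.2.1 w.2
              (p.1 + (w.1 + r.1), r.2.1, r.2.2)
            else
              let r := pvDfsM s fail l rs nm nt ns p.2.1 p.2.2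
              (p.1 + (0 + r.1), r.2.1, r.2.2)
          else
            let r := pvDfsM s fail l rs 0 nt ns p.2.1 p.2.2
            (p.1 + (0 + r.1), r.2.1, r.2.2)) (0, md, mw)
      (st.1, st.2.1.insert (rs.length + 1, m, tight, started) st.1, st.2.2)

def count_within (kk : Int) (s : String) : Int :=
  if kk ≤ 0 then 0
  else
    let digits := (PySem.Int.toStr kk).toList.map (fun c => c.toNat - 48)
    let sl := s.toList
    let fail := pvGetFailure sl
    (pvDfsM sl fail sl.length digits 0 true false PySem.Dict.empty PySem.Dict.empty).1

-- ===== PORT B =====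
def pvScatStep (s : List Char) (fail : List Nat) (l : Nat) (rem : Int)
    (p : Int × List Int) (it : Nat × Nat × Int) : Int × List Int :=
  let nm := pvTrans s fail it.1 (pvDigitChar it.2.1)
  if nm = l then
    let t := fail.getD (l-1) 0
    (p.1 + it.2.2 * rem, p.2.set t (p.2.getD t 0 + it.2.2))
  else
    (p.1, p.2.set nm (p.2.getD nm 0 + it.2.2))

def pvItems (l : Nat) (vec : List Int) (zeros : Int) (tm : Nat) (lo d : Nat) :
    List (Nat × Nat × Int) :=
  ((List.range l).flatMap (fun m => (List.range 10).map (fun dd => (m, dd, vec.getD m 0))))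
  ++ ((List.range' 1 9).map (fun dd => ((0:Nat), dd, zeros)))
  ++ ((List.range' lo (d - lo)).map (fun dd => (tm, dd, (1:Int))))

def pvForward (s : List Char) (fail : List Nat) (l : Nat) :
    List Nat → Int → List Int → Int → Nat → Bool → Int
  | [], ans, _, _, _, _ => ans
  | d :: rs, ans, vec, zeros, tm, tst =>
    let rem : Int := 10 ^ rs.length
    let lo : Nat := if tst then 0 else 1
    let p := (pvItems l vec zeros tm lo d).foldl (pvScatStep s fail l rem) (ans, List.replicate l 0)
    let nzeros := zeros + (if tst = false ∧ 0 < d then 1 else 0)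
    if tst = true ∨ 0 < d then
      let nm := pvTrans s fail tm (pvDigitChar d)
      if nm = l then
        let rv := rs.foldl (fun (a : Int) (q : Nat) => a * 10 + (q : Int)) 0
        pvForward s fail l rs (p.1 + (rv + 1)) p.2 nzeros (fail.getD (l-1) 0) true
      else
        pvForward s fail l rs p.1 p.2 nzeros nm true
    else
      pvForward s fail l rs p.1 p.2 nzeros 0 false

def count_within_alt (kk : Int) (s : String) : Int :=
  if kk ≤ 0 then 0
  else
    let digits := (PySem.Int.toStr kk).toList.map (fun c => c.toNat - 48)
    let sl := s.toList
    let fail := pvGetFailure sl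
    pvForward sl fail sl.length digits 0 (List.replicate sl.length 0) 0 0 false

-- ===== PRECONDITION & SPEC =====
-- Pre_ excludes only the inputs where BOTH Pythons raise IndexError: kk > 0 with an empty pattern string
-- (transition indexes s[0] of the empty string there).
def Pre_count_within (kk : Int) (s : String) : Prop := kk ≤ 0 ∨ s ≠ ""
instance (kk : Int) (s : String) : Decidable (Pre_count_within kk s) := by
  unfold Pre_count_within; infer_instance

def pvWitness_count_within : Int × String := (25, "5")

def Spec_count_within (kk : Int) (s : String) (out : Int) : Prop := out = count_within_alt kk s
instance (kk : Int) (s : String) (out : Int) : Decidable (Spec_count_within kk s out) := by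
  unfold Spec_count_within; infer_instance

-- ===== CLAIM (what is proved, stated in full; the proofs are below) =====
def Claim_equal_count_within : Prop := ∀ (kk : Int) (s : String), Dom_count_within kk s → Pre_count_within kk s → Spec_count_within kk s (count_within kk s)

-- ===== LEMMAS AND PROOFS =====

-- target state of one scattered transition
def pvTgt (s : List Char) (fail : List Nat) (l : Nat) (m dd : Nat) : Nat :=
  let nm := pvTrans s fail m (pvDigitChar dd)
  if nm = l then fail.getD (l-1) 0 else nm

-- KMP failure arrays: every entry is ≤ its index
def pvFailOk (fail : List Nat) : Prop := ∀ k, fail.getD k 0 ≤ k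

-- weighted sum of a state-count vector against a valuation
def pvWSum (v : List Int) (f : Nat → Int) (l : Nat) : Int :=
  ∑ m ∈ Finset.range l, v.getD m 0 * f m

-- memo-free reference versions of A's memoised ways/dfs (same values; used only in proofs)
def pvWays : List Nat → Bool → Bool → Int
  | [], _, started => if started then 1 else 0
  | d :: rs, tight, started =>
    ((List.range ((if tight then d else 9) + 1)).map (fun dd =>
      pvWays rs (tight && decide (dd = d)) (started || decide (0 < dd)))).sum


def pvDfs (s : List Char) (fail : List Nat) (l : Nat) : List Nat → Nat → Bool → Bool → Int
  | [], _, _, _ => 0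
  | d :: rs, m, tight, started =>
    ((List.range ((if tight then d else 9) + 1)).map (fun dd =>
      let nt := tight && decide (dd = d)
      let ns := started || decide (0 < dd)
      if ns then
        let nm := pvTrans s fail m (pvDigitChar dd)
        (if nm = l then pvWays rs nt ns else 0)
          + pvDfs s fail l rs (if nm = l then fail.getD (l-1) 0 else nm) nt ns
      else
        pvDfs s fail l rs 0 nt ns)).sum

-- memo dicts only ever hold the value of the corresponding memo-free function on the unique suffix of that length
def pvValidW (digits : List Nat) (mw : PySem.Dict (Nat × Bool × Bool) Int) : Prop :=
  ∀ k t st v, mw.get? (k, t, st) = some v →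
    v = pvWays (digits.drop (digits.length - k)) t st

def pvValidD (s : List Char) (fail : List Nat) (l : Nat) (digits : List Nat)
    (md : PySem.Dict (Nat × Nat × Bool × Bool) Int) : Prop :=
  ∀ k m t st v, md.get? (k, m, t, st) = some v →
    v = pvDfs s fail l (digits.drop (digits.length - k)) m t st

theorem pvWaysM_spec (digits : List Nat) :
    ∀ (rs : List Nat) (t st : Bool) (mw : PySem.Dict (Nat × Bool × Bool) Int),
      rs <:+ digits → pvValidW digits mw →
      (pvWaysM rs t st mw).1 = pvWays rs t st ∧ pvValidW digits (pvWaysM rs t st mw).2 := by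
  intro rs
  induction rs with
  | nil =>
    intro t st mw _ hv
    exact ⟨by simp [pvWaysM, pvWays], hv⟩
  | cons d rs ih =>
    intro t st mw hsuf hv
    have hsuf' : rs <:+ digits := (List.suffix_cons d rs).trans hsuf
    have hdrop : digits.drop (digits.length - (rs.length + 1)) = d :: rs := by
      have h := List.suffix_iff_eq_drop.mp hsuf
      simpa using h.symm
    simp only [pvWaysM]
    cases hget : mw.get? (rs.length + 1, t, st) with
    | some v =>
      refine ⟨?_, hv⟩
      have := hv _ _ _ _ hget
      rw [this, hdrop]
    | none =>
      have hfold : ∀ (L : List Nat) (p : Int × PySem.Dict (Nat × Bool × Bool) Int),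
          pvValidW digits p.2 →
          (L.foldl (fun (p : Int × PySem.Dict (Nat × Bool × Bool) Int) dd =>
              let r := pvWaysM rs (t && decide (dd = d)) (st || decide (0 < dd)) p.2
              (p.1 + r.1, r.2)) p).1
            = p.1 + ((L.map (fun dd => pvWays rs (t && decide (dd = d)) (st || decide (0 < dd)))).sum)
          ∧ pvValidW digits
            (L.foldl (fun (p : Int × PySem.Dict (Nat × Bool × Bool) Int) dd =>
              let r := pvWaysM rs (t && decide (dd = d)) (st || decide (0 < dd)) p.2
              (p.1 + r.1, r.2)) p).2 := by
        intro L
        induction L with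
        | nil => intro p hp; exact ⟨by simp, hp⟩
        | cons dd L ihL =>
          intro p hp
          obtain ⟨h1, h2⟩ := ih (t && decide (dd = d)) (st || decide (0 < dd)) p.2 hsuf' hp
          obtain ⟨h3, h4⟩ := ihL
            (p.1 + (pvWaysM rs (t && decide (dd = d)) (st || decide (0 < dd)) p.2).1,
             (pvWaysM rs (t && decide (dd = d)) (st || decide (0 < dd)) p.2).2) h2
          refine ⟨?_, h4⟩
          rw [List.foldl_cons]
          exact h3.trans (by rw [h1]; simp only [List.map_cons, List.sum_cons]; ring)
      obtain ⟨hf1, hf2⟩ := hfold (List.range ((if t then d else 9) + 1)) (0, mw) hv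
      constructor
      · exact hf1.trans (by simp [pvWays])
      · intro k' t' st' v hg
        rw [PySem.Dict.get?_insert] at hg
        by_cases hk : ((k', t', st') = ((rs.length + 1 : Nat), t, st))
        · rw [if_pos hk] at hg
          have hk' : k' = rs.length + 1 ∧ t' = t ∧ st' = st := by
            simpa [Prod.ext_iff] using hk
          obtain ⟨hk1, hk2, hk3⟩ := hk'
          subst hk1; subst hk2; subst hk3
          injection hg with hgv
          rw [hdrop, ← hgv]
          exact hf1.trans (by simp [pvWays])
        · rw [if_neg hk] at hg
          exact hf2 _ _ _ _ hg

theorem pvDfsM_spec (s : List Char) (fail : List Nat) (l : Nat) (digits : List Nat) :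
    ∀ (rs : List Nat) (m : Nat) (t st : Bool)
      (md : PySem.Dict (Nat × Nat × Bool × Bool) Int) (mw : PySem.Dict (Nat × Bool × Bool) Int),
      rs <:+ digits → pvValidD s fail l digits md → pvValidW digits mw →
      (pvDfsM s fail l rs m t st md mw).1 = pvDfs s fail l rs m t st
      ∧ pvValidD s fail l digits (pvDfsM s fail l rs m t st md mw).2.1
      ∧ pvValidW digits (pvDfsM s fail l rs m t st md mw).2.2 := by
  intro rs
  induction rs with
  | nil =>
    intro m t st md mw _ hd hw
    exact ⟨by simp [pvDfsM, pvDfs], hd, hw⟩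
  | cons d rs ih =>
    intro m t st md mw hsuf hd hw
    have hsuf' : rs <:+ digits := (List.suffix_cons d rs).trans hsuf
    have hdrop : digits.drop (digits.length - (rs.length + 1)) = d :: rs := by
      have h := List.suffix_iff_eq_drop.mp hsuf
      simpa using h.symm
    simp only [pvDfsM]
    cases hget : md.get? (rs.length + 1, m, t, st) with
    | some v =>
      refine ⟨?_, hd, hw⟩
      have := hd _ _ _ _ _ hget
      rw [this, hdrop]
    | none =>
      have hone : ∀ (q : Int × PySem.Dict (Nat × Nat × Bool × Bool) Int × PySem.Dict (Nat × Bool × Bool) Int)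
          (dd : Nat), pvValidD s fail l digits q.2.1 → pvValidW digits q.2.2 →
          ((fun (p : Int × PySem.Dict (Nat × Nat × Bool × Bool) Int × PySem.Dict (Nat × Bool × Bool) Int) dd =>
            let nt := t && decide (dd = d)
            let ns := st || decide (0 < dd)
            if ns then
              let nm := pvTrans s fail m (pvDigitChar dd)
              if nm = l then
                let w := pvWaysM rs nt ns p.2.2
                let r := pvDfsM s fail l rs (fail.getD (l-1) 0) nt ns p.2.1 w.2
                (p.1 + (w.1 + r.1), r.2.1, r.2.2)
              else
                let r := pvDfsM s fail l rs nm nt ns p.2.1 p.2.2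
                (p.1 + (0 + r.1), r.2.1, r.2.2)
            else
              let r := pvDfsM s fail l rs 0 nt ns p.2.1 p.2.2
              (p.1 + (0 + r.1), r.2.1, r.2.2)) q dd).1
            = q.1 + ((fun dd =>
                let nt := t && decide (dd = d)
                let ns := st || decide (0 < dd)
                if ns then
                  (if pvTrans s fail m (pvDigitChar dd) = l then pvWays rs nt ns else 0)
                    + pvDfs s fail l rs
                        (if pvTrans s fail m (pvDigitChar dd) = l then fail.getD (l-1) 0
                         else pvTrans s fail m (pvDigitChar dd)) nt ns
                else pvDfs s fail l rs 0 nt ns) dd)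
          ∧ pvValidD s fail l digits ((fun (p : Int × PySem.Dict (Nat × Nat × Bool × Bool) Int × PySem.Dict (Nat × Bool × Bool) Int) dd =>
            let nt := t && decide (dd = d)
            let ns := st || decide (0 < dd)
            if ns then
              let nm := pvTrans s fail m (pvDigitChar dd)
              if nm = l then
                let w := pvWaysM rs nt ns p.2.2
                let r := pvDfsM s fail l rs (fail.getD (l-1) 0) nt ns p.2.1 w.2
                (p.1 + (w.1 + r.1), r.2.1, r.2.2)
              else
                let r := pvDfsM s fail l rs nm nt ns p.2.1 p.2.2
                (p.1 + (0 + r.1), r.2.1, r.2.2)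
            else
              let r := pvDfsM s fail l rs 0 nt ns p.2.1 p.2.2
              (p.1 + (0 + r.1), r.2.1, r.2.2)) q dd).2.1
          ∧ pvValidW digits ((fun (p : Int × PySem.Dict (Nat × Nat × Bool × Bool) Int × PySem.Dict (Nat × Bool × Bool) Int) dd =>
            let nt := t && decide (dd = d)
            let ns := st || decide (0 < dd)
            if ns then
              let nm := pvTrans s fail m (pvDigitChar dd)
              if nm = l then
                let w := pvWaysM rs nt ns p.2.2
                let r := pvDfsM s fail l rs (fail.getD (l-1) 0) nt ns p.2.1 w.2
                (p.1 + (w.1 + r.1), r.2.1, r.2.2)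
              else
                let r := pvDfsM s fail l rs nm nt ns p.2.1 p.2.2
                (p.1 + (0 + r.1), r.2.1, r.2.2)
            else
              let r := pvDfsM s fail l rs 0 nt ns p.2.1 p.2.2
              (p.1 + (0 + r.1), r.2.1, r.2.2)) q dd).2.2 := by
        intro q dd hqd hqw
        dsimp only
        cases hns : (st || decide (0 < dd)) with
        | false =>
          simp only [if_false, Bool.false_eq_true]
          obtain ⟨e1, e2, e3⟩ := ih 0 (t && decide (dd = d)) false q.2.1 q.2.2 hsuf' hqd hqw
          exact ⟨by rw [e1]; try ring, e2, e3⟩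
        | true =>
          simp only [if_true]
          by_cases hnm : pvTrans s fail m (pvDigitChar dd) = l
          · simp only [if_pos hnm]
            obtain ⟨w1, w2⟩ := pvWaysM_spec digits rs (t && decide (dd = d)) true q.2.2 hsuf' hqw
            obtain ⟨e1, e2, e3⟩ := ih (fail.getD (l-1) 0) (t && decide (dd = d)) true q.2.1
              (pvWaysM rs (t && decide (dd = d)) true q.2.2).2 hsuf' hqd w2
            exact ⟨by rw [e1, w1]; try ring, e2, e3⟩
          · simp only [if_neg hnm]
            obtain ⟨e1, e2, e3⟩ := ih (pvTrans s fail m (pvDigitChar dd)) (t && decide (dd = d)) true q.2.1 q.2.2 hsuf' hqd hqw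
            exact ⟨by rw [e1]; try ring, e2, e3⟩
      have hfold : ∀ (L : List Nat)
          (p : Int × PySem.Dict (Nat × Nat × Bool × Bool) Int × PySem.Dict (Nat × Bool × Bool) Int),
          pvValidD s fail l digits p.2.1 → pvValidW digits p.2.2 →
          (L.foldl (fun (p : Int × PySem.Dict (Nat × Nat × Bool × Bool) Int × PySem.Dict (Nat × Bool × Bool) Int) dd =>
            let nt := t && decide (dd = d)
            let ns := st || decide (0 < dd)
            if ns then
              let nm := pvTrans s fail m (pvDigitChar dd)
              if nm = l then
                let w := pvWaysM rs nt ns p.2.2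
                let r := pvDfsM s fail l rs (fail.getD (l-1) 0) nt ns p.2.1 w.2
                (p.1 + (w.1 + r.1), r.2.1, r.2.2)
              else
                let r := pvDfsM s fail l rs nm nt ns p.2.1 p.2.2
                (p.1 + (0 + r.1), r.2.1, r.2.2)
            else
              let r := pvDfsM s fail l rs 0 nt ns p.2.1 p.2.2
              (p.1 + (0 + r.1), r.2.1, r.2.2)) p).1
            = p.1 + ((L.map (fun dd =>
                let nt := t && decide (dd = d)
                let ns := st || decide (0 < dd)
                if ns then
                  (if pvTrans s fail m (pvDigitChar dd) = l then pvWays rs nt ns else 0)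
                    + pvDfs s fail l rs
                        (if pvTrans s fail m (pvDigitChar dd) = l then fail.getD (l-1) 0
                         else pvTrans s fail m (pvDigitChar dd)) nt ns
                else pvDfs s fail l rs 0 nt ns)).sum)
          ∧ pvValidD s fail l digits
              ((L.foldl (fun (p : Int × PySem.Dict (Nat × Nat × Bool × Bool) Int × PySem.Dict (Nat × Bool × Bool) Int) dd =>
                let nt := t && decide (dd = d)
                let ns := st || decide (0 < dd)
                if ns then
                  let nm := pvTrans s fail m (pvDigitChar dd)
                  if nm = l then
                    let w := pvWaysM rs nt ns p.2.2
                    let r := pvDfsM s fail l rs (fail.getD (l-1) 0) nt ns p.2.1 w.2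
                    (p.1 + (w.1 + r.1), r.2.1, r.2.2)
                  else
                    let r := pvDfsM s fail l rs nm nt ns p.2.1 p.2.2
                    (p.1 + (0 + r.1), r.2.1, r.2.2)
                else
                  let r := pvDfsM s fail l rs 0 nt ns p.2.1 p.2.2
                  (p.1 + (0 + r.1), r.2.1, r.2.2)) p).2.1)
          ∧ pvValidW digits
              ((L.foldl (fun (p : Int × PySem.Dict (Nat × Nat × Bool × Bool) Int × PySem.Dict (Nat × Bool × Bool) Int) dd =>
                let nt := t && decide (dd = d)
                let ns := st || decide (0 < dd)
                if ns then
                  let nm := pvTrans s fail m (pvDigitChar dd)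
                  if nm = l then
                    let w := pvWaysM rs nt ns p.2.2
                    let r := pvDfsM s fail l rs (fail.getD (l-1) 0) nt ns p.2.1 w.2
                    (p.1 + (w.1 + r.1), r.2.1, r.2.2)
                  else
                    let r := pvDfsM s fail l rs nm nt ns p.2.1 p.2.2
                    (p.1 + (0 + r.1), r.2.1, r.2.2)
                else
                  let r := pvDfsM s fail l rs 0 nt ns p.2.1 p.2.2
                  (p.1 + (0 + r.1), r.2.1, r.2.2)) p).2.2) := by
        intro L
        induction L with
        | nil => intro p hp1 hp2; exact ⟨by simp, hp1, hp2⟩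
        | cons dd L ihL =>
          intro p hp1 hp2
          obtain ⟨o1, o2, o3⟩ := hone p dd hp1 hp2
          obtain ⟨h3, h4, h5⟩ := ihL _ o2 o3
          refine ⟨?_, h4, h5⟩
          rw [List.foldl_cons]
          exact h3.trans (by rw [o1]; simp only [List.map_cons, List.sum_cons]; ring)
      obtain ⟨hf1, hf2, hf3⟩ := hfold (List.range ((if t then d else 9) + 1)) (0, md, mw) hd hw
      have hval : _ = pvDfs s fail l (d :: rs) m t st := hf1.trans (by simp [pvDfs])
      refine ⟨hval, ?_, hf3⟩
      intro k' m' t' st' v hg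
      rw [PySem.Dict.get?_insert] at hg
      by_cases hk : ((k', m', t', st') = ((rs.length + 1 : Nat), m, t, st))
      · rw [if_pos hk] at hg
        have hk' : k' = rs.length + 1 ∧ m' = m ∧ t' = t ∧ st' = st := by
          simpa [Prod.ext_iff] using hk
        obtain ⟨hk1, hk2, hk3, hk4⟩ := hk'
        subst hk1; subst hk2; subst hk3; subst hk4
        injection hg with hgv
        rw [hdrop, ← hgv]
        exact hval
      · rw [if_neg hk] at hg
        exact hf2 _ _ _ _ _ hg

theorem pvFall_le (s : List Char) (fail : List Nat) (c : Char) (hf : pvFailOk fail) :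
    ∀ fuel j, pvFall s fail c fuel j ≤ j := by
  intro fuel
  induction fuel with
  | zero => intro j; simp [pvFall]
  | succ n ih =>
    intro j
    simp only [pvFall]
    split
    · have h1 := ih (fail.getD (j - 1) 0)
      have h2 := hf (j - 1)
      omega
    · exact le_refl j

theorem pvTrans_le (s : List Char) (fail : List Nat) (c : Char) (l : Nat)
    (hf : pvFailOk fail) (st : Nat) (h : st < l) : pvTrans s fail st c ≤ l := by
  unfold pvTrans
  have := pvFall_le s fail c hf st st
  simp only
  split <;> omega

theorem pvGetFailure_aux (s : List Char) :
    ∀ (n a : Nat) (f : List Nat) (j : Nat), pvFailOk f → j < a →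
    pvFailOk (((List.range' a n).foldl (fun (st : List Nat × Nat) i =>
      let j1 := pvFall s st.1 (s.getD i ' ') st.2 st.2
      let j2 := if s.getD i ' ' = s.getD j1 ' ' then j1 + 1 else j1
      (st.1.set i j2, j2)) (f, j)).1) := by
  intro n
  induction n with
  | zero => intro a f j hf _; simpa using hf
  | succ n ih =>
    intro a f j hf hj
    rw [List.range'_succ, List.foldl_cons]
    have hj1 : pvFall s f (s.getD a ' ') j j ≤ j := pvFall_le s f (s.getD a ' ') hf j j
    simp only [List.getD_eq_getElem?_getD] at hj1 ⊢
    refine ih (a + 1) _ _ ?_ ?_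
    · intro k
      by_cases hk : k = a
      · subst hk
        by_cases hlen : k < f.length
        · simp only [List.getD_eq_getElem?_getD, List.getElem?_set_self, hlen]
          simp only [Option.getD_some]
          split <;> omega
        · rw [List.set_eq_of_length_le (by omega)]
          exact hf k
      · simp only [List.getD_eq_getElem?_getD, List.getElem?_set_ne (fun h => hk h.symm)]
        exact hf k
    · dsimp only
      split <;> omega

theorem pvGetFailure_ok (s : List Char) : pvFailOk (pvGetFailure s) := by
  unfold pvGetFailure
  refine pvGetFailure_aux s (s.length - 1) 1 (List.replicate s.length 0) 0 ?_ (by omega)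
  intro k
  simp only [List.getD_eq_getElem?_getD, List.getElem?_replicate]
  split <;> simp

theorem pvWays_free (rs : List Nat) : pvWays rs false true = 10 ^ rs.length := by
  induction rs with
  | nil => simp [pvWays]
  | cons d rs ih =>
    simp only [pvWays, Bool.false_and, Bool.true_or, ih]
    rw [PySem.List.sum_map_const_int]
    simp [pow_succ]
    ring

theorem pvValFold (rs : List Nat) : ∀ a : Int,
    rs.foldl (fun (a : Int) (q : Nat) => a * 10 + (q : Int)) a
    = a * 10 ^ rs.length + rs.foldl (fun (a : Int) (q : Nat) => a * 10 + (q : Int)) 0 := by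
  induction rs with
  | nil => intro a; simp
  | cons d rs ih =>
    intro a
    simp only [List.foldl_cons]
    rw [ih (a * 10 + (d : Int)), ih (0 * 10 + (d : Int))]
    simp [pow_succ]
    ring

theorem pvWays_tight (rs : List Nat) :
    pvWays rs true true = rs.foldl (fun (a : Int) (q : Nat) => a * 10 + (q : Int)) 0 + 1 := by
  induction rs with
  | nil => simp [pvWays]
  | cons d rs ih =>
    have hfront : ((List.range d).map (fun dd =>
        pvWays rs (true && decide (dd = d)) (true || decide (0 < dd)))).sum
        = (d : Int) * 10 ^ rs.length := by
      rw [List.map_congr_left (l := List.range d)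
        (g := fun _ => (10 : Int) ^ rs.length)
        (by intro dd hdd
            have hne : dd ≠ d := Nat.ne_of_lt (List.mem_range.mp hdd)
            simp [hne, pvWays_free])]
      rw [PySem.List.sum_map_const_int]
      simp
    rw [show pvWays (d :: rs) true true
        = ((List.range (d + 1)).map (fun dd =>
            pvWays rs (true && decide (dd = d)) (true || decide (0 < dd)))).sum
      from by simp [pvWays]]
    rw [List.range_succ, List.map_append, List.sum_append, hfront]
    simp only [List.map_cons, List.map_nil, List.sum_cons, List.sum_nil]
    simp only [decide_true, Bool.and_true, Bool.true_or, ih, add_zero]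
    rw [List.foldl_cons, pvValFold rs (0 * 10 + (d : Int))]
    ring

theorem pvWSum_set (v : List Int) (f : Nat → Int) (l t : Nat) (c : Int)
    (hl : v.length = l) (ht : t < l) :
    pvWSum (v.set t (v.getD t 0 + c)) f l = pvWSum v f l + c * f t := by
  unfold pvWSum
  have hg : ∀ m ∈ Finset.range l,
      (v.set t (v.getD t 0 + c)).getD m 0 * f m
      = v.getD m 0 * f m + (if m = t then c * f m else 0) := by
    intro m _
    by_cases hmt : m = t
    · subst hmt
      simp only [List.getD_eq_getElem?_getD, List.getElem?_set_self, hl ▸ ht, if_pos]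
      simp [hl ▸ ht]
      ring
    · simp only [List.getD_eq_getElem?_getD, List.getElem?_set_ne (fun h => hmt h.symm)]
      simp [hmt]
  rw [Finset.sum_congr rfl hg, Finset.sum_add_distrib,
    Finset.sum_ite_eq_of_mem' (Finset.range l) t _ (Finset.mem_range.mpr ht)]

theorem pvWSum_replicate (f : Nat → Int) (l : Nat) :
    pvWSum (List.replicate l 0) f l = 0 := by
  unfold pvWSum
  apply Finset.sum_eq_zero
  intro m hm
  simp [List.getD_eq_getElem?_getD, Finset.mem_range.mp hm]

theorem pvScat_spec (s : List Char) (fail : List Nat) (l : Nat) (rem : Int) (f : Nat → Int)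
    (hl0 : 0 < l) (hf : pvFailOk fail) :
    ∀ (items : List (Nat × Nat × Int)) (p : Int × List Int),
      p.2.length = l → (∀ it ∈ items, it.1 < l) →
      (items.foldl (pvScatStep s fail l rem) p).2.length = l ∧
      (items.foldl (pvScatStep s fail l rem) p).1
        + pvWSum (items.foldl (pvScatStep s fail l rem) p).2 f l
      = p.1 + pvWSum p.2 f l
        + (items.map (fun it =>
            (if pvTrans s fail it.1 (pvDigitChar it.2.1) = l then it.2.2 * rem else 0)
            + it.2.2 * f (pvTgt s fail l it.1 it.2.1))).sum := by
  intro items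
  induction items with
  | nil => intro p hp _; simp [hp]
  | cons it its ih =>
    intro p hp hlt
    have hit1 : it.1 < l := hlt it (List.mem_cons_self)
    have hits : ∀ x ∈ its, x.1 < l := fun x hx => hlt x (List.mem_cons_of_mem _ hx)
    have hnmle : pvTrans s fail it.1 (pvDigitChar it.2.1) ≤ l :=
      pvTrans_le s fail (pvDigitChar it.2.1) l hf it.1 hit1
    have htgt : pvTgt s fail l it.1 it.2.1 < l := by
      unfold pvTgt
      have := hf (l - 1)
      dsimp only
      split <;> omega
    have hstep : pvScatStep s fail l rem p it
        = (p.1 + (if pvTrans s fail it.1 (pvDigitChar it.2.1) = l then it.2.2 * rem else 0),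
           p.2.set (pvTgt s fail l it.1 it.2.1)
             (p.2.getD (pvTgt s fail l it.1 it.2.1) 0 + it.2.2)) := by
      unfold pvScatStep pvTgt
      dsimp only
      split <;> simp
    rw [List.foldl_cons, hstep]
    obtain ⟨ihlen, ihsum⟩ := ih
      (p.1 + (if pvTrans s fail it.1 (pvDigitChar it.2.1) = l then it.2.2 * rem else 0),
       p.2.set (pvTgt s fail l it.1 it.2.1)
         (p.2.getD (pvTgt s fail l it.1 it.2.1) 0 + it.2.2))
      (by simpa using hp) hits
    refine ⟨ihlen, ?_⟩
    rw [ihsum]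
    simp only [List.map_cons, List.sum_cons]
    rw [pvWSum_set p.2 f l (pvTgt s fail l it.1 it.2.1) it.2.2 hp htgt]
    ring

theorem pvSumRange (n : Nat) (g : Nat → Int) :
    ((List.range n).map g).sum = ∑ i ∈ Finset.range n, g i := rfl

theorem pvSumFlatMap (l : List Nat) (h : Nat → List Int) :
    (List.flatMap h l).sum = (l.map (fun a => (h a).sum)).sum := by
  induction l with
  | nil => simp
  | cons a l ih => simp [List.flatMap_cons, ih]

theorem pvDfs_cons_free (s : List Char) (fail : List Nat) (l : Nat) (m d : Nat) (rs : List Nat) :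
    pvDfs s fail l (d :: rs) m false true
    = ((List.range 10).map (fun dd =>
        (if pvTrans s fail m (pvDigitChar dd) = l then (10 : Int) ^ rs.length else 0)
        + pvDfs s fail l rs (pvTgt s fail l m dd) false true)).sum := by
  simp [pvDfs, pvTgt, pvWays_free]

theorem pvDfs_cons_zero (s : List Char) (fail : List Nat) (l : Nat) (d : Nat) (rs : List Nat) :
    pvDfs s fail l (d :: rs) 0 false false
    = pvDfs s fail l rs 0 false false
      + ((List.range' 1 9).map (fun dd =>
          (if pvTrans s fail 0 (pvDigitChar dd) = l then (10 : Int) ^ rs.length else 0)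
          + pvDfs s fail l rs (pvTgt s fail l 0 dd) false true)).sum := by
  simp only [pvDfs]
  rw [show ((if (false : Bool) then d else 9) + 1) = 10 from by simp]
  rw [show (List.range 10) = 0 :: List.range' 1 9 from rfl]
  rw [List.map_cons, List.sum_cons]
  have hhead : (if (false || decide (0 < 0) : Bool) then
      (if pvTrans s fail 0 (pvDigitChar 0) = l then pvWays rs (false && decide (0 = d)) (false || decide (0 < 0)) else 0)
        + pvDfs s fail l rs (if pvTrans s fail 0 (pvDigitChar 0) = l then fail.getD (l-1) 0 else pvTrans s fail 0 (pvDigitChar 0)) (false && decide (0 = d)) (false || decide (0 < 0))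
      else pvDfs s fail l rs 0 (false && decide (0 = d)) (false || decide (0 < 0)))
      = pvDfs s fail l rs 0 false false := by simp
  have htail : List.map (fun dd =>
      if (false || decide (0 < dd) : Bool) then
        (if pvTrans s fail 0 (pvDigitChar dd) = l then pvWays rs (false && decide (dd = d)) (false || decide (0 < dd)) else 0)
          + pvDfs s fail l rs (if pvTrans s fail 0 (pvDigitChar dd) = l then fail.getD (l-1) 0 else pvTrans s fail 0 (pvDigitChar dd)) (false && decide (dd = d)) (false || decide (0 < dd))
      else pvDfs s fail l rs 0 (false && decide (dd = d)) (false || decide (0 < dd))) (List.range' 1 9)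
      = List.map (fun dd =>
          (if pvTrans s fail 0 (pvDigitChar dd) = l then (10 : Int) ^ rs.length else 0)
          + pvDfs s fail l rs (pvTgt s fail l 0 dd) false true) (List.range' 1 9) := by
    apply List.map_congr_left
    intro dd hdd
    have h1 : 0 < dd := (List.mem_range'_1.mp hdd).1
    simp [h1, pvTgt, pvWays_free, List.getD_eq_getElem?_getD]
  rw [hhead, htail]

theorem pvDfs_cons_tight_true (s : List Char) (fail : List Nat) (l : Nat) (tm d : Nat) (rs : List Nat) :
    pvDfs s fail l (d :: rs) tm true true
    = ((List.range' 0 d).map (fun dd =>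
        (if pvTrans s fail tm (pvDigitChar dd) = l then (10 : Int) ^ rs.length else 0)
        + pvDfs s fail l rs (pvTgt s fail l tm dd) false true)).sum
      + ((if pvTrans s fail tm (pvDigitChar d) = l
            then rs.foldl (fun (a : Int) (q : Nat) => a * 10 + (q : Int)) 0 + 1 else 0)
         + pvDfs s fail l rs (pvTgt s fail l tm d) true true) := by
  simp only [pvDfs]
  rw [show ((if True then d else 9) + 1) = d + 1 from by simp]
  rw [List.range_succ, List.map_append, List.sum_append]
  have hfront : List.map (fun dd =>
      if (true || decide (0 < dd) : Bool) then
        (if pvTrans s fail tm (pvDigitChar dd) = l then pvWays rs (true && decide (dd = d)) (true || decide (0 < dd)) else 0)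
          + pvDfs s fail l rs (if pvTrans s fail tm (pvDigitChar dd) = l then fail.getD (l-1) 0 else pvTrans s fail tm (pvDigitChar dd)) (true && decide (dd = d)) (true || decide (0 < dd))
      else pvDfs s fail l rs 0 (true && decide (dd = d)) (true || decide (0 < dd))) (List.range d)
      = List.map (fun dd =>
          (if pvTrans s fail tm (pvDigitChar dd) = l then (10 : Int) ^ rs.length else 0)
          + pvDfs s fail l rs (pvTgt s fail l tm dd) false true) (List.range d) := by
    apply List.map_congr_left
    intro dd hdd
    have hne : dd ≠ d := Nat.ne_of_lt (List.mem_range.mp hdd)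
    simp [hne, pvTgt, pvWays_free, List.getD_eq_getElem?_getD]
  rw [hfront, List.range_eq_range']
  simp [pvWays_tight, pvTgt, List.getD_eq_getElem?_getD]

theorem pvDfs_cons_tight_false_zero (s : List Char) (fail : List Nat) (l : Nat) (rs : List Nat) :
    pvDfs s fail l (0 :: rs) 0 true false = pvDfs s fail l rs 0 true false := by
  simp [pvDfs]

theorem pvDfs_cons_tight_false_pos (s : List Char) (fail : List Nat) (l : Nat) (d : Nat)
    (hd : 0 < d) (rs : List Nat) :
    pvDfs s fail l (d :: rs) 0 true false
    = pvDfs s fail l rs 0 false false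
      + ((List.range' 1 (d - 1)).map (fun dd =>
          (if pvTrans s fail 0 (pvDigitChar dd) = l then (10 : Int) ^ rs.length else 0)
          + pvDfs s fail l rs (pvTgt s fail l 0 dd) false true)).sum
      + ((if pvTrans s fail 0 (pvDigitChar d) = l
            then rs.foldl (fun (a : Int) (q : Nat) => a * 10 + (q : Int)) 0 + 1 else 0)
         + pvDfs s fail l rs (pvTgt s fail l 0 d) true true) := by
  simp only [pvDfs]
  rw [show ((if True then d else 9) + 1) = d + 1 from by simp]
  rw [List.range_succ, List.map_append, List.sum_append]
  rw [show List.range d = 0 :: List.range' 1 (d - 1) from by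
    rw [List.range_eq_range']
    cases d with
    | zero => omega
    | succ n => simp [List.range'_succ]]
  rw [List.map_cons, List.sum_cons]
  have hhead : (if (false || decide (0 < 0) : Bool) then
      (if pvTrans s fail 0 (pvDigitChar 0) = l then pvWays rs (true && decide (0 = d)) (false || decide (0 < 0)) else 0)
        + pvDfs s fail l rs (if pvTrans s fail 0 (pvDigitChar 0) = l then fail.getD (l-1) 0 else pvTrans s fail 0 (pvDigitChar 0)) (true && decide (0 = d)) (false || decide (0 < 0))
      else pvDfs s fail l rs 0 (true && decide (0 = d)) (false || decide (0 < 0)))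
      = pvDfs s fail l rs 0 false false := by
    have hne : (0 : Nat) ≠ d := by omega
    simp [hne]
  have htail : List.map (fun dd =>
      if (false || decide (0 < dd) : Bool) then
        (if pvTrans s fail 0 (pvDigitChar dd) = l then pvWays rs (true && decide (dd = d)) (false || decide (0 < dd)) else 0)
          + pvDfs s fail l rs (if pvTrans s fail 0 (pvDigitChar dd) = l then fail.getD (l-1) 0 else pvTrans s fail 0 (pvDigitChar dd)) (true && decide (dd = d)) (false || decide (0 < dd))
      else pvDfs s fail l rs 0 (true && decide (dd = d)) (false || decide (0 < dd))) (List.range' 1 (d - 1))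
      = List.map (fun dd =>
          (if pvTrans s fail 0 (pvDigitChar dd) = l then (10 : Int) ^ rs.length else 0)
          + pvDfs s fail l rs (pvTgt s fail l 0 dd) false true) (List.range' 1 (d - 1)) := by
    apply List.map_congr_left
    intro dd hdd
    have h1 : 0 < dd := (List.mem_range'_1.mp hdd).1
    have hne : dd ≠ d := by
      have := (List.mem_range'_1.mp hdd).2
      omega
    simp [h1, hne, pvTgt, pvWays_free, List.getD_eq_getElem?_getD]
  rw [hhead, htail]
  simp [hd, pvWays_tight, pvTgt, List.getD_eq_getElem?_getD]

theorem pvDfsM_empty (s : List Char) (fail : List Nat) (l : Nat) (digits : List Nat) :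
    (pvDfsM s fail l digits 0 true false PySem.Dict.empty PySem.Dict.empty).1
    = pvDfs s fail l digits 0 true false :=
  (pvDfsM_spec s fail l digits digits 0 true false PySem.Dict.empty PySem.Dict.empty
    (List.suffix_refl _)
    (by intro k m t st v h; simp [PySem.Dict.get?_empty] at h)
    (by intro k t st v h; simp [PySem.Dict.get?_empty] at h)).1

theorem pvForward_cons (s : List Char) (fail : List Nat) (l : Nat) (d : Nat) (rs : List Nat)
    (ans : Int) (vec : List Int) (zeros : Int) (tm : Nat) (tst : Bool) :
    pvForward s fail l (d :: rs) ans vec zeros tm tst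
    = (if tst = true ∨ 0 < d then
        (if pvTrans s fail tm (pvDigitChar d) = l then
          pvForward s fail l rs
            (((pvItems l vec zeros tm (if tst then 0 else 1) d).foldl
                (pvScatStep s fail l ((10 : Int) ^ rs.length)) (ans, List.replicate l 0)).1
              + (rs.foldl (fun (a : Int) (q : Nat) => a * 10 + (q : Int)) 0 + 1))
            (((pvItems l vec zeros tm (if tst then 0 else 1) d).foldl
                (pvScatStep s fail l ((10 : Int) ^ rs.length)) (ans, List.replicate l 0)).2)
            (zeros + (if tst = false ∧ 0 < d then 1 else 0)) (fail.getD (l-1) 0) true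
        else
          pvForward s fail l rs
            (((pvItems l vec zeros tm (if tst then 0 else 1) d).foldl
                (pvScatStep s fail l ((10 : Int) ^ rs.length)) (ans, List.replicate l 0)).1)
            (((pvItems l vec zeros tm (if tst then 0 else 1) d).foldl
                (pvScatStep s fail l ((10 : Int) ^ rs.length)) (ans, List.replicate l 0)).2)
            (zeros + (if tst = false ∧ 0 < d then 1 else 0))
            (pvTrans s fail tm (pvDigitChar d)) true)
      else
        pvForward s fail l rs
          (((pvItems l vec zeros tm (if tst then 0 else 1) d).foldl
              (pvScatStep s fail l ((10 : Int) ^ rs.length)) (ans, List.replicate l 0)).1)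
          (((pvItems l vec zeros tm (if tst then 0 else 1) d).foldl
              (pvScatStep s fail l ((10 : Int) ^ rs.length)) (ans, List.replicate l 0)).2)
          (zeros + (if tst = false ∧ 0 < d then 1 else 0)) 0 false) := rfl

theorem pvForward_inv (s : List Char) (fail : List Nat) (l : Nat)
    (hl0 : 0 < l) (hf : pvFailOk fail) :
    ∀ (rs : List Nat) (ans : Int) (vec : List Int) (zeros : Int) (tm : Nat) (tst : Bool),
      vec.length = l → tm < l → (tst = false → tm = 0) →
      pvForward s fail l rs ans vec zeros tm tst
      = ans + pvWSum vec (fun m => pvDfs s fail l rs m false true) l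
          + zeros * pvDfs s fail l rs 0 false false
          + pvDfs s fail l rs tm true tst := by
  intro rs
  induction rs with
  | nil =>
    intro ans vec zeros tm tst hlen htm htst
    simp [pvForward, pvDfs, pvWSum]
  | cons d rs ih =>
    intro ans vec zeros tm tst hlen htm htst
    have hitems : ∀ it ∈ pvItems l vec zeros tm (if tst then 0 else 1) d, it.1 < l := by
      intro it hit
      unfold pvItems at hit
      simp only [List.mem_append, List.mem_flatMap, List.mem_map] at hit
      rcases hit with ((⟨m, hm, dd, _, rfl⟩) | ⟨dd, _, rfl⟩) | ⟨dd, _, rfl⟩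
      · exact List.mem_range.mp hm
      · exact hl0
      · exact htm
    obtain ⟨hPlen, hPsum⟩ := pvScat_spec s fail l ((10 : Int) ^ rs.length)
      (fun m => pvDfs s fail l rs m false true) hl0 hf
      (pvItems l vec zeros tm (if tst then 0 else 1) d) (ans, List.replicate l 0)
      (by simp) hitems
    dsimp only at hPsum
    rw [pvWSum_replicate] at hPsum
    unfold pvItems at hPsum
    unfold pvItems at hPlen
    rw [List.map_append, List.map_append, List.sum_append, List.sum_append] at hPsum
    have hinner : ∀ (m : Nat) (c : Int),
        ((List.range 10).map (fun dd =>
          (if pvTrans s fail m (pvDigitChar dd) = l then c * (10 : Int) ^ rs.length else 0)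
          + c * pvDfs s fail l rs (pvTgt s fail l m dd) false true)).sum
        = c * pvDfs s fail l (d :: rs) m false true := by
      intro m c
      rw [pvDfs_cons_free]
      rw [← PySem.List.sum_map_const_mul_int]
      apply congrArg List.sum
      apply List.map_congr_left
      intro dd _
      by_cases h : pvTrans s fail m (pvDigitChar dd) = l <;> simp [h] <;> ring
    have h1 : (List.map (fun it =>
          (if pvTrans s fail it.1 (pvDigitChar it.2.1) = l then it.2.2 * (10:Int) ^ rs.length else 0)
          + it.2.2 * pvDfs s fail l rs (pvTgt s fail l it.1 it.2.1) false true)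
          ((List.range l).flatMap (fun m => (List.range 10).map (fun dd => (m, dd, vec.getD m 0))))).sum
        = pvWSum vec (fun m => pvDfs s fail l (d :: rs) m false true) l := by
      rw [List.map_flatMap, pvSumFlatMap]
      have hstep1 : ∀ m ∈ List.range l,
          ((List.map (fun dd => (m, dd, vec.getD m 0)) (List.range 10)).map (fun it =>
            (if pvTrans s fail it.1 (pvDigitChar it.2.1) = l then it.2.2 * (10:Int) ^ rs.length else 0)
            + it.2.2 * pvDfs s fail l rs (pvTgt s fail l it.1 it.2.1) false true)).sum
          = vec.getD m 0 * pvDfs s fail l (d :: rs) m false true := by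
        intro m _
        rw [List.map_map]
        exact hinner m (vec.getD m 0)
      rw [List.map_congr_left hstep1, pvSumRange]
      rfl
    have h2 : (List.map (fun it =>
          (if pvTrans s fail it.1 (pvDigitChar it.2.1) = l then it.2.2 * (10:Int) ^ rs.length else 0)
          + it.2.2 * pvDfs s fail l rs (pvTgt s fail l it.1 it.2.1) false true)
          ((List.range' 1 9).map (fun dd => ((0:Nat), dd, zeros)))).sum
        = zeros * (pvDfs s fail l (d :: rs) 0 false false - pvDfs s fail l rs 0 false false) := by
      rw [List.map_map]
      have : ∀ dd ∈ List.range' 1 9,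
          ((fun it => (if pvTrans s fail it.1 (pvDigitChar it.2.1) = l then it.2.2 * (10:Int) ^ rs.length else 0)
            + it.2.2 * pvDfs s fail l rs (pvTgt s fail l it.1 it.2.1) false true)
            ∘ (fun dd => ((0:Nat), dd, zeros))) dd
          = zeros * ((if pvTrans s fail 0 (pvDigitChar dd) = l then (10:Int) ^ rs.length else 0)
              + pvDfs s fail l rs (pvTgt s fail l 0 dd) false true) := by
        intro dd _
        by_cases h : pvTrans s fail 0 (pvDigitChar dd) = l <;> simp [h] <;> ring
      rw [List.map_congr_left this, PySem.List.sum_map_const_mul_int, pvDfs_cons_zero]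
      ring
    have h3 : (List.map (fun it =>
          (if pvTrans s fail it.1 (pvDigitChar it.2.1) = l then it.2.2 * (10:Int) ^ rs.length else 0)
          + it.2.2 * pvDfs s fail l rs (pvTgt s fail l it.1 it.2.1) false true)
          ((List.range' (if tst then 0 else 1) (d - (if tst then 0 else 1))).map
            (fun dd => (tm, dd, (1:Int))))).sum
        = ((List.range' (if tst then 0 else 1) (d - (if tst then 0 else 1))).map (fun dd =>
            (if pvTrans s fail tm (pvDigitChar dd) = l then (10:Int) ^ rs.length else 0)
            + pvDfs s fail l rs (pvTgt s fail l tm dd) false true)).sum := by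
      rw [List.map_map]
      apply congrArg List.sum
      apply List.map_congr_left
      intro dd _
      simp
    rw [h1, h2, h3] at hPsum
    rw [pvForward_cons]
    unfold pvItems
    cases tst with
    | false =>
      have htm0 : tm = 0 := htst rfl
      subst htm0
      simp only [Bool.false_eq_true, if_false] at hPsum hPlen ⊢
      by_cases hd : 0 < d
      · rw [if_pos (Or.inr hd)]
        rw [if_pos (show (True ∧ 0 < d) from ⟨trivial, hd⟩)]
        by_cases hhit : pvTrans s fail 0 (pvDigitChar d) = l
        · rw [if_pos hhit]
          rw [ih _ _ _ _ _ hPlen (by have := hf (l - 1); omega) (by intro h; cases h)]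
          rw [pvDfs_cons_tight_false_pos s fail l d hd rs]
          have htgt : pvTgt s fail l 0 d = fail.getD (l - 1) 0 := by
            unfold pvTgt; simp [hhit]
          rw [← htgt, if_pos hhit]
          linear_combination hPsum
        · rw [if_neg hhit]
          have htm' : pvTrans s fail 0 (pvDigitChar d) < l := by
            have := pvTrans_le s fail (pvDigitChar d) l hf 0 hl0
            omega
          rw [ih _ _ _ _ _ hPlen htm' (by intro h; cases h)]
          rw [pvDfs_cons_tight_false_pos s fail l d hd rs]
          have htgt : pvTgt s fail l 0 d = pvTrans s fail 0 (pvDigitChar d) := by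
            unfold pvTgt; simp [hhit]
          rw [if_neg hhit, ← htgt]
          linear_combination hPsum
      · have hd0 : d = 0 := by omega
        subst hd0
        simp only [show List.range' 1 (0 - 1) = ([] : List Nat) from rfl,
          List.map_nil, List.sum_nil, List.append_nil] at hPsum hPlen ⊢
        rw [if_neg (by simp)]
        rw [if_neg (show ¬ (True ∧ (0:Nat) < 0) from by simp)]
        rw [ih _ _ _ _ _ hPlen hl0 (fun _ => rfl)]
        rw [pvDfs_cons_tight_false_zero]
        rw [pvDfs_cons_zero] at hPsum ⊢
        linear_combination hPsum
    | true =>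
      simp only [if_true, Nat.sub_zero] at hPsum hPlen ⊢
      rw [if_pos (show (True ∨ 0 < d) from Or.inl trivial)]
      rw [if_neg (show ¬ (true = false ∧ 0 < d) from by simp)]
      by_cases hhit : pvTrans s fail tm (pvDigitChar d) = l
      · rw [if_pos hhit]
        rw [ih _ _ _ _ _ hPlen (by have := hf (l - 1); omega) (by intro h; cases h)]
        rw [pvDfs_cons_tight_true s fail l tm d rs]
        have htgt : pvTgt s fail l tm d = fail.getD (l - 1) 0 := by
          unfold pvTgt; simp [hhit]
        rw [← htgt, if_pos hhit]
        linear_combination hPsum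
      · rw [if_neg hhit]
        have htm' : pvTrans s fail tm (pvDigitChar d) < l := by
          have := pvTrans_le s fail (pvDigitChar d) l hf tm htm
          omega
        rw [ih _ _ _ _ _ hPlen htm' (by intro h; cases h)]
        rw [pvDfs_cons_tight_true s fail l tm d rs]
        have htgt : pvTgt s fail l tm d = pvTrans s fail tm (pvDigitChar d) := by
          unfold pvTgt; simp [hhit]
        rw [if_neg hhit, ← htgt]
        linear_combination hPsum

-- ===== VERDICT (by name: the statement is the Claim_ definition above) =====
set_option maxHeartbeats 1000000 in
theorem count_within_spec : Claim_equal_count_within := by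
  unfold Claim_equal_count_within
  intro kk s _ hpre
  unfold Spec_count_within count_within count_within_alt
  by_cases hk : kk ≤ 0
  · rw [if_pos hk, if_pos hk]
  · rw [if_neg hk, if_neg hk]
    have hs : s ≠ "" := by
      rcases hpre with h | h
      · exact absurd h hk
      · exact h
    have hl0 : 0 < s.toList.length := by
      have : s.toList ≠ [] := by simpa [String.toList_eq_nil_iff] using hs
      cases hsl : s.toList with
      | nil => exact absurd hsl this
      | cons a t => simp
    rw [pvDfsM_empty]
    rw [pvForward_inv s.toList (pvGetFailure s.toList) s.toList.length hl0
      (pvGetFailure_ok s.toList)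
      ((PySem.Int.toStr kk).toList.map (fun c => c.toNat - 48)) 0
      (List.replicate s.toList.length 0) 0 0 false
      (by simp) hl0 (fun _ => rfl)]
    rw [pvWSum_replicate]
    ring
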